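-- pv_equiv track=rewrite | github.com/katalla1/school | sarcasm detector prolog/SarcasmTweetExtraction.py | removeHastagsAndAtsFromString
-- ===== SOURCE A (Python) =====
-- def removeHastagsAndAtsFromString(input_string):
--     return_string = ''
--     hashtagStringLength = 0
--     for char in input_string:
--         if char == '#' or char == '@':
--             hashtagStringLength = 1
--         elif hashtagStringLength > 0 and (char == ' ' or char == '\n'):
--             hashtagStringLength = 0
--             return_string += char
--         elif hashtagStringLength > 0:
--             hashtagStringLength += 1
--         else:
--             return_string += char
--     return return_string
-- ===== SOURCE B (Python) =====
-- import re
--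
-- def removeHastagsAndAtsFromString(input_string):
--     return re.sub(r'[#@][^ \n]*', '', input_string)
-- ===== Notes on version B (the rewrite author's own statement) =====
-- stated objective: idiomatic
-- what changed: Replaces the character-by-character state machine with a single re.sub of the pattern '[#@][^ \n]*', deleting each hashtag/mention token in one call.
import Mathlib
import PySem

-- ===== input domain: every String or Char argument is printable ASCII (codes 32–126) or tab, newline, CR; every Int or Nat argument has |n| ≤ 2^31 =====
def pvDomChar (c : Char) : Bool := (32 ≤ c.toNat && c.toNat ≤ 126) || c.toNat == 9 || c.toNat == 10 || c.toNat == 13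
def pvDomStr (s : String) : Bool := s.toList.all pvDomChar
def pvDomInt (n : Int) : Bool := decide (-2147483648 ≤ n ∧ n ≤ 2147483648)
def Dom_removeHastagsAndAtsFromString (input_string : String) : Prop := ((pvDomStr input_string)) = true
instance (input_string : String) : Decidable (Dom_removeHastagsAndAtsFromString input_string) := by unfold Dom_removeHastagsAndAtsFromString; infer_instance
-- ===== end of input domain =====

-- B replaces A's character-by-character state machine with a single regex substitution
-- (re.sub(r'[#@][^ \n]*', '', s)); objective: idiomatic.

-- ===== PORT A =====
-- the for-loop over the characters with state (return_string, hashtagStringLength)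
def pvLoopA : List Char → List Char → Int → List Char
  | [], acc, _ => acc
  | c :: rest, acc, k =>
    if c = '#' ∨ c = '@' then pvLoopA rest acc 1
    else if k > 0 ∧ (c = ' ' ∨ c = '\n') then pvLoopA rest (acc ++ [c]) 0
    else if k > 0 then pvLoopA rest acc (k + 1)
    else pvLoopA rest (acc ++ [c]) k

def removeHastagsAndAtsFromString (input_string : String) : String :=
  String.mk (pvLoopA input_string.toList [] 0)

-- ===== PORT B =====
-- re.sub(r'[#@][^ \n]*', '', s): scan for a match start ('#' or '@'), delete the maximal
-- run of characters that are neither ' ' nor '\n', continue after it; other chars are kept.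
def pvSub : List Char → List Char
  | [] => []
  | c :: rest =>
    if c = '#' ∨ c = '@' then
      pvSub (rest.dropWhile (fun d => !(d = ' ' || d = '\n')))
    else c :: pvSub rest
termination_by cs => cs.length
decreasing_by
  · exact Nat.lt_succ_of_le (List.length_dropWhile_le _ _)
  · simp

def removeHastagsAndAtsFromString_alt (input_string : String) : String :=
  String.mk (pvSub input_string.toList)

-- ===== PRECONDITION & SPEC =====
def Spec_removeHastagsAndAtsFromString (input_string : String) (out : String) : Prop := out = removeHastagsAndAtsFromString_alt input_string
instance (input_string : String) (out : String) : Decidable (Spec_removeHastagsAndAtsFromString input_string out) := by unfold Spec_removeHastagsAndAtsFromString; infer_instance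

-- ===== CLAIM (what is proved, stated in full; the proofs are below) =====
def Claim_equal_removeHastagsAndAtsFromString : Prop := ∀ (input_string : String), Dom_removeHastagsAndAtsFromString input_string → Spec_removeHastagsAndAtsFromString input_string (removeHastagsAndAtsFromString input_string)

-- ===== LEMMAS AND PROOFS =====

-- inside a token (k > 0), B's remaining output is pvSub of the input after the token is dropped
def pvSubIn (cs : List Char) : List Char :=
  pvSub (cs.dropWhile (fun d => !(d = ' ' || d = '\n')))

lemma pvLoopA_eq (cs : List Char) : ∀ (acc : List Char) (k : Int),
    pvLoopA cs acc k = acc ++ (if k > 0 then pvSubIn cs else pvSub cs) := by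
  induction cs with
  | nil => intro acc k; simp [pvLoopA, pvSubIn, pvSub]
  | cons c rest ih =>
    intro acc k
    by_cases hh : c = '#' ∨ c = '@'
    · have h1 : pvSubIn (c :: rest) = pvSubIn rest := by
        rcases hh with h | h <;> subst h <;> simp [pvSubIn, List.dropWhile_cons]
      have h2 : pvSub (c :: rest) = pvSubIn rest := by
        rw [pvSub]; simp [hh, pvSubIn]
      rw [pvLoopA, if_pos hh, ih, if_pos (show (1:Int) > 0 by norm_num)]
      by_cases hk : k > 0 <;> simp [hk, h1, h2]
    · by_cases ht : c = ' ' ∨ c = '\n'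
      · have hsub : pvSub (c :: rest) = c :: pvSub rest := by
          rw [pvSub]; simp [hh]
        have hin : pvSubIn (c :: rest) = c :: pvSub rest := by
          rcases ht with h | h <;> subst h <;>
            simp [pvSubIn, hsub]
        by_cases hk : k > 0
        · rw [pvLoopA, if_neg hh, if_pos (And.intro hk ht), ih]
          simp [hk, hin]
        · have hna : ¬(k > 0 ∧ (c = ' ' ∨ c = '\n')) := fun h => hk h.1
          rw [pvLoopA, if_neg hh, if_neg hna, if_neg hk, ih]
          simp [hk, hsub]
      · obtain ⟨hc1, hc2⟩ := not_or.mp ht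
        have hsub : pvSub (c :: rest) = c :: pvSub rest := by
          rw [pvSub]; simp [hh]
        have hin : pvSubIn (c :: rest) = pvSubIn rest := by
          simp [pvSubIn, hc1, hc2]
        have hna : ¬(k > 0 ∧ (c = ' ' ∨ c = '\n')) := fun h => ht h.2
        by_cases hk : k > 0
        · rw [pvLoopA, if_neg hh, if_neg hna, if_pos hk, ih]
          have hk1 : k + 1 > 0 := by omega
          simp [hk, hk1, hin]
        · rw [pvLoopA, if_neg hh, if_neg hna, if_neg hk, ih]
          simp [hk, hsub]

-- ===== VERDICT (by name: the statement is the Claim_ definition above) =====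
theorem removeHastagsAndAtsFromString_spec : Claim_equal_removeHastagsAndAtsFromString := by
  intro s _
  unfold Spec_removeHastagsAndAtsFromString removeHastagsAndAtsFromString removeHastagsAndAtsFromString_alt
  rw [pvLoopA_eq]
  simp
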